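-- pv_equiv track=rewrite | github.com/ZombieSocrates/brainteasers | CodeWars/PalindromeNumber.py | filter_zeros_and_ones
-- ===== SOURCE A (Python) =====
-- from collections import Counter
--
-- def filter_zeros_and_ones(in_list: list):
--     '''Including duplicate zeros and ones isn't helpful here. This ensures
--     any input doesn't have dupes of these numbers
--     '''
--     out_list = []
--     for m, n in Counter(in_list).items():
--         if m > 1:
--             out_list.extend([m] * n)
--         elif m == 1:
--             out_list.extend([m] * min(2, n))
--         else:
--             out_list.append(0)
--     return out_list
-- ===== SOURCE B (Python) =====
-- def _left_index(a, x):
--     '''first position of x in sorted list a (len(a) if absent): binary search'''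
--     lo, hi = 0, len(a)
--     while lo < hi:
--         mid = (lo + hi) // 2
--         if a[mid] < x:
--             lo = mid + 1
--         else:
--             hi = mid
--     return lo
--
-- def _right_index(a, x):
--     '''position just past the last x in sorted list a: binary search'''
--     lo, hi = 0, len(a)
--     while lo < hi:
--         mid = (lo + hi) // 2
--         if a[mid] <= x:
--             lo = mid + 1
--         else:
--             hi = mid
--     return lo
--
-- def filter_zeros_and_ones(in_list: list):
--     '''Sort-and-search instead of hash counting: sort a copy once, then for each
--     distinct value (ordered dedup) find its multiplicity by two binary searches
--     in the sorted copy and emit the capped group.'''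
--     srt = sorted(in_list)
--     out_list = []
--     for v in dict.fromkeys(in_list):
--         if v > 1:
--             out_list += [v] * (_right_index(srt, v) - _left_index(srt, v))
--         elif v == 1:
--             out_list += [v] * min(2, _right_index(srt, v) - _left_index(srt, v))
--         else:
--             out_list.append(0)
--     return out_list
-- ===== Notes on version B (the rewrite author's own statement) =====
-- stated objective: alternative
-- what changed: Replaces hash counting (Counter) by sort-and-search: sort a copy of the list once, then for each distinct value (ordered dedup via dict.fromkeys) obtain its multiplicity with two hand-written binary searches in the sorted copy and emit the capped group.
import Mathlib
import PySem

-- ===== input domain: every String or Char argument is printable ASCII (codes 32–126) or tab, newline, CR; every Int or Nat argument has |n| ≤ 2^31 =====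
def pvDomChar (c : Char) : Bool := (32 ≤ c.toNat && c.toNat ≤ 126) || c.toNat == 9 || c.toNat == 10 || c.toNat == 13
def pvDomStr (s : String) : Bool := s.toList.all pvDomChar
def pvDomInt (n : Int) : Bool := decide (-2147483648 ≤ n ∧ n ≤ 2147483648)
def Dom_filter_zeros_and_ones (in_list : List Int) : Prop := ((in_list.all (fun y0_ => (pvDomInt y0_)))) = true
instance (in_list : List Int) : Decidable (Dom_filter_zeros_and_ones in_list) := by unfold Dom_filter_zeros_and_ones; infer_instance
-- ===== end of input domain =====

-- B replaces hash counting (Counter) by sort-and-search: sort a copy once, then emit each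
-- distinct value's capped group using two binary searches for its multiplicity (objective: alternative).

-- ===== PORT A =====
-- for m, n in Counter(in_list).items(): extend/append per branch
def filter_zeros_and_ones (in_list : List Int) : List Int :=
  (PySem.Dict.counter in_list).items.foldl
    (fun out_list mn =>
      if mn.1 > 1 then out_list ++ List.replicate mn.2.toNat mn.1
      else if mn.1 = 1 then out_list ++ List.replicate (min 2 mn.2).toNat mn.1
      else out_list ++ [0])
    []

-- ===== PORT B =====
-- Source B's _left_index while loop (lo, hi as arguments of the tail recursion)
def pvLeftGo (a : List Int) (x lo hi : Int) : Int :=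
  if _h : lo < hi then
    if PySem.List.pyGetD a (PySem.Int.floordiv (lo + hi) 2) 0 < x then
      pvLeftGo a x (PySem.Int.floordiv (lo + hi) 2 + 1) hi
    else pvLeftGo a x lo (PySem.Int.floordiv (lo + hi) 2)
  else lo
  termination_by (hi - lo).toNat
  decreasing_by
  · have h1 := (PySem.Int.floordiv_two_mid_bounds (le_of_lt _h)).1
    have h2 : PySem.Int.floordiv (lo + hi) 2 < hi :=
      (PySem.Int.floordiv_lt_iff_lt_mul (by omega)).mpr (by omega)
    omega
  · have h1 := (PySem.Int.floordiv_two_mid_bounds (le_of_lt _h)).1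
    have h2 : PySem.Int.floordiv (lo + hi) 2 < hi :=
      (PySem.Int.floordiv_lt_iff_lt_mul (by omega)).mpr (by omega)
    omega

-- Source B's _left_index(a, x): lo, hi = 0, len(a)
def pvLeftIndex (a : List Int) (x : Int) : Int := pvLeftGo a x 0 (a.length : Int)

-- Source B's _right_index while loop
def pvRightGo (a : List Int) (x lo hi : Int) : Int :=
  if _h : lo < hi then
    if PySem.List.pyGetD a (PySem.Int.floordiv (lo + hi) 2) 0 ≤ x then
      pvRightGo a x (PySem.Int.floordiv (lo + hi) 2 + 1) hi
    else pvRightGo a x lo (PySem.Int.floordiv (lo + hi) 2)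
  else lo
  termination_by (hi - lo).toNat
  decreasing_by
  · have h1 := (PySem.Int.floordiv_two_mid_bounds (le_of_lt _h)).1
    have h2 : PySem.Int.floordiv (lo + hi) 2 < hi :=
      (PySem.Int.floordiv_lt_iff_lt_mul (by omega)).mpr (by omega)
    omega
  · have h1 := (PySem.Int.floordiv_two_mid_bounds (le_of_lt _h)).1
    have h2 : PySem.Int.floordiv (lo + hi) 2 < hi :=
      (PySem.Int.floordiv_lt_iff_lt_mul (by omega)).mpr (by omega)
    omega

-- Source B's _right_index(a, x): lo, hi = 0, len(a)
def pvRightIndex (a : List Int) (x : Int) : Int := pvRightGo a x 0 (a.length : Int)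

-- srt = sorted(in_list); for v in dict.fromkeys(in_list): emit capped group per branch
def filter_zeros_and_ones_alt (in_list : List Int) : List Int :=
  let srt := PySem.List.sorted in_list (fun y => y) false
  (PySem.List.dedup in_list).foldl
    (fun out_list v =>
      if v > 1 then out_list ++ List.replicate (pvRightIndex srt v - pvLeftIndex srt v).toNat v
      else if v = 1 then out_list ++ List.replicate (min 2 (pvRightIndex srt v - pvLeftIndex srt v)).toNat v
      else out_list ++ [0])
    []

-- ===== PRECONDITION & SPEC =====
def Spec_filter_zeros_and_ones (in_list : List Int) (out : List Int) : Prop := out = filter_zeros_and_ones_alt in_list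
instance (in_list : List Int) (out : List Int) : Decidable (Spec_filter_zeros_and_ones in_list out) := by unfold Spec_filter_zeros_and_ones; infer_instance

-- ===== CLAIM (what is proved, stated in full; the proofs are below) =====
def Claim_equal_filter_zeros_and_ones : Prop := ∀ (in_list : List Int), Dom_filter_zeros_and_ones in_list → Spec_filter_zeros_and_ones in_list (filter_zeros_and_ones in_list)

-- ===== LEMMAS AND PROOFS =====

-- the capped group emitted for value m counted in xs (proof-side abbreviation)
def pvGroup (xs : List Int) (m : Int) : List Int :=
  if m > 1 then List.replicate (xs.count m) m
  else if m = 1 then List.replicate (min 2 ((xs.count m : Int))).toNat m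
  else [0]

lemma pvFlatMap_congr {α β : Type} (l : List α) (f g : α → List β)
    (h : ∀ x ∈ l, f x = g x) : l.flatMap f = l.flatMap g := by
  induction l with
  | nil => rfl
  | cons a l ih => simp [List.flatMap_cons, h a (by simp), ih (fun x hx => h x (by simp [hx]))]

-- sorted lists are getElem-monotone
lemma pvSorted_mono (a : List Int) (hs : a.Pairwise (· ≤ ·)) (i j : Nat)
    (hij : i ≤ j) (hj : j < a.length) : a[i]'(by omega) ≤ a[j] := by
  rcases Nat.lt_or_ge i j with h | h
  · exact List.pairwise_iff_getElem.mp hs i j (by omega) hj h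
  · have : i = j := by omega
    subst this; exact le_refl _

-- invariant of Source B's _left_index loop: the result splits a at the first position ≥ x
lemma pvLeftGo_spec (a : List Int) (x : Int) (hs : a.Pairwise (· ≤ ·)) (lo hi : Int)
    (h0 : 0 ≤ lo) (hle : lo ≤ hi) (hhi : hi ≤ (a.length : Int))
    (hb : ∀ (j : Nat) (hj : j < a.length), (j : Int) < lo → a[j] < x)
    (ha : ∀ (j : Nat) (hj : j < a.length), hi ≤ (j : Int) → x ≤ a[j]) :
    lo ≤ pvLeftGo a x lo hi ∧ pvLeftGo a x lo hi ≤ hi ∧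
    (∀ (j : Nat) (hj : j < a.length),
      ((j : Int) < pvLeftGo a x lo hi → a[j] < x) ∧ (pvLeftGo a x lo hi ≤ (j : Int) → x ≤ a[j])) := by
  induction lo, hi using pvLeftGo.induct a x with
  | case1 lo hi hlt hcmp ih =>
    have hm1 := (PySem.Int.floordiv_two_mid_bounds (le_of_lt hlt)).1
    have hm2 : PySem.Int.floordiv (lo + hi) 2 < hi :=
      (PySem.Int.floordiv_lt_iff_lt_mul (by omega)).mpr (by omega)
    set mid := PySem.Int.floordiv (lo + hi) 2 with hmid
    have hmlen : mid.toNat < a.length := by omega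
    have hget : PySem.List.pyGetD a mid 0 = a[mid.toNat] :=
      PySem.List.pyGetD_eq_getElem _ _ (by omega) (by omega)
    rw [hget] at hcmp
    have hb' : ∀ (j : Nat) (hj : j < a.length), (j : Int) < mid + 1 → a[j] < x := by
      intro j hj hjm
      have : a[j] ≤ a[mid.toNat] := pvSorted_mono a hs j mid.toNat (by omega) hmlen
      omega
    have := ih (by omega) (by omega) hhi hb' ha
    rw [pvLeftGo, dif_pos hlt]
    simp only [← hmid]
    rw [hget, if_pos hcmp]
    exact ⟨by omega, this.2.1, this.2.2⟩
  | case2 lo hi hlt hcmp ih =>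
    have hm1 := (PySem.Int.floordiv_two_mid_bounds (le_of_lt hlt)).1
    have hm2 : PySem.Int.floordiv (lo + hi) 2 < hi :=
      (PySem.Int.floordiv_lt_iff_lt_mul (by omega)).mpr (by omega)
    set mid := PySem.Int.floordiv (lo + hi) 2 with hmid
    have hmlen : mid.toNat < a.length := by omega
    have hget : PySem.List.pyGetD a mid 0 = a[mid.toNat] :=
      PySem.List.pyGetD_eq_getElem _ _ (by omega) (by omega)
    rw [hget] at hcmp
    have ha' : ∀ (j : Nat) (hj : j < a.length), mid ≤ (j : Int) → x ≤ a[j] := by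
      intro j hj hjm
      have : a[mid.toNat] ≤ a[j] := pvSorted_mono a hs mid.toNat j (by omega) hj
      omega
    have := ih h0 (by omega) (by omega) hb ha'
    rw [pvLeftGo, dif_pos hlt]
    simp only [← hmid]
    rw [hget, if_neg hcmp]
    exact ⟨this.1, by omega, this.2.2⟩
  | case3 lo hi hlt =>
    rw [pvLeftGo, dif_neg hlt]
    refine ⟨le_refl _, hle, fun j hj => ⟨hb j hj, fun hlo => ha j hj (by omega)⟩⟩

-- invariant of Source B's _right_index loop: the result splits a just past the last x
lemma pvRightGo_spec (a : List Int) (x : Int) (hs : a.Pairwise (· ≤ ·)) (lo hi : Int)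
    (h0 : 0 ≤ lo) (hle : lo ≤ hi) (hhi : hi ≤ (a.length : Int))
    (hb : ∀ (j : Nat) (hj : j < a.length), (j : Int) < lo → a[j] ≤ x)
    (ha : ∀ (j : Nat) (hj : j < a.length), hi ≤ (j : Int) → x < a[j]) :
    lo ≤ pvRightGo a x lo hi ∧ pvRightGo a x lo hi ≤ hi ∧
    (∀ (j : Nat) (hj : j < a.length),
      ((j : Int) < pvRightGo a x lo hi → a[j] ≤ x) ∧ (pvRightGo a x lo hi ≤ (j : Int) → x < a[j])) := by
  induction lo, hi using pvRightGo.induct a x with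
  | case1 lo hi hlt hcmp ih =>
    have hm1 := (PySem.Int.floordiv_two_mid_bounds (le_of_lt hlt)).1
    have hm2 : PySem.Int.floordiv (lo + hi) 2 < hi :=
      (PySem.Int.floordiv_lt_iff_lt_mul (by omega)).mpr (by omega)
    set mid := PySem.Int.floordiv (lo + hi) 2 with hmid
    have hmlen : mid.toNat < a.length := by omega
    have hget : PySem.List.pyGetD a mid 0 = a[mid.toNat] :=
      PySem.List.pyGetD_eq_getElem _ _ (by omega) (by omega)
    rw [hget] at hcmp
    have hb' : ∀ (j : Nat) (hj : j < a.length), (j : Int) < mid + 1 → a[j] ≤ x := by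
      intro j hj hjm
      have : a[j] ≤ a[mid.toNat] := pvSorted_mono a hs j mid.toNat (by omega) hmlen
      omega
    have := ih (by omega) (by omega) hhi hb' ha
    rw [pvRightGo, dif_pos hlt]
    simp only [← hmid]
    rw [hget, if_pos hcmp]
    exact ⟨by omega, this.2.1, this.2.2⟩
  | case2 lo hi hlt hcmp ih =>
    have hm1 := (PySem.Int.floordiv_two_mid_bounds (le_of_lt hlt)).1
    have hm2 : PySem.Int.floordiv (lo + hi) 2 < hi :=
      (PySem.Int.floordiv_lt_iff_lt_mul (by omega)).mpr (by omega)
    set mid := PySem.Int.floordiv (lo + hi) 2 with hmid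
    have hmlen : mid.toNat < a.length := by omega
    have hget : PySem.List.pyGetD a mid 0 = a[mid.toNat] :=
      PySem.List.pyGetD_eq_getElem _ _ (by omega) (by omega)
    rw [hget] at hcmp
    have ha' : ∀ (j : Nat) (hj : j < a.length), mid ≤ (j : Int) → x < a[j] := by
      intro j hj hjm
      have : a[mid.toNat] ≤ a[j] := pvSorted_mono a hs mid.toNat j (by omega) hj
      omega
    have := ih h0 (by omega) (by omega) hb ha'
    rw [pvRightGo, dif_pos hlt]
    simp only [← hmid]
    rw [hget, if_neg hcmp]
    exact ⟨this.1, by omega, this.2.2⟩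
  | case3 lo hi hlt =>
    rw [pvRightGo, dif_neg hlt]
    refine ⟨le_refl _, hle, fun j hj => ⟨hb j hj, fun hlo => ha j hj (by omega)⟩⟩

-- the two binary searches bracket exactly the occurrences of x
lemma pvCount_eq (a : List Int) (x : Int) (hs : a.Pairwise (· ≤ ·)) :
    pvRightIndex a x - pvLeftIndex a x = (a.count x : Int) := by
  have hL := pvLeftGo_spec a x hs 0 (a.length : Int) (le_refl _) (by omega) (le_refl _)
    (fun j hj h => by omega) (fun j hj h => by omega)
  have hR := pvRightGo_spec a x hs 0 (a.length : Int) (le_refl _) (by omega) (le_refl _)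
    (fun j hj h => by omega) (fun j hj h => by omega)
  unfold pvLeftIndex pvRightIndex
  set L := pvLeftGo a x 0 (a.length : Int) with hLdef
  set R := pvRightGo a x 0 (a.length : Int) with hRdef
  obtain ⟨hL0, hLlen, hLsplit⟩ := hL
  obtain ⟨hR0, hRlen, hRsplit⟩ := hR
  have hLR : L ≤ R := by
    by_contra hcon
    have hRlt : R.toNat < a.length := by omega
    have h1 := (hLsplit R.toNat hRlt).1 (by omega)
    have h2 := (hRsplit R.toNat hRlt).2 (by omega)
    omega
  set l := L.toNat with hl
  set r := R.toNat with hr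
  have hlr : l ≤ r := by omega
  have hrlen : r ≤ a.length := by omega
  have hsplit : a = a.take l ++ ((a.drop l).take (r - l) ++ (a.drop l).drop (r - l)) := by
    rw [List.take_append_drop, List.take_append_drop]
  have hdrop : (a.drop l).drop (r - l) = a.drop r := by
    rw [List.drop_drop]; congr 1; omega
  have hc1 : (a.take l).count x = 0 := by
    rw [List.count_eq_zero]
    intro hmem
    obtain ⟨i, hi, hieq⟩ := List.mem_iff_getElem.mp hmem
    have hilen : i < a.length := by
      have := hi; simp [List.length_take] at this; omega
    have : a[i] = x := by
      rw [← hieq]; simp [List.getElem_take]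
    have := (hLsplit i hilen).1 (by have := hi; simp [List.length_take] at this; omega)
    omega
  have hc2 : ((a.drop l).take (r - l)).count x = r - l := by
    have hlen : ((a.drop l).take (r - l)).length = r - l := by
      simp [List.length_take, List.length_drop]; omega
    have hall : ∀ b ∈ (a.drop l).take (r - l), x = b := by
      intro b hb
      obtain ⟨i, hi, hieq⟩ := List.mem_iff_getElem.mp hb
      have hi' : i < r - l := by have := hi; rw [hlen] at this; exact this
      have hilen : l + i < a.length := by omega
      have hbval : b = a[l + i] := by
        rw [← hieq]; simp [List.getElem_take, List.getElem_drop]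
      have h1 := (hLsplit (l + i) hilen).2 (by omega)
      have h2 := (hRsplit (l + i) hilen).1 (by omega)
      omega
    have := List.count_eq_length.mpr hall
    rw [hlen] at this
    exact this
  have hc3 : (a.drop r).count x = 0 := by
    rw [List.count_eq_zero]
    intro hmem
    obtain ⟨i, hi, hieq⟩ := List.mem_iff_getElem.mp hmem
    have hilen : r + i < a.length := by
      have := hi; simp [List.length_drop] at this; omega
    have : a[r + i] = x := by rw [← hieq]; simp [List.getElem_drop]
    have := (hRsplit (r + i) hilen).2 (by omega)
    omega
  have hcount : a.count x = r - l := by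
    conv_lhs => rw [hsplit]
    rw [hdrop, List.count_append, List.count_append, hc1, hc2, hc3]
    omega
  omega

-- A's output characterised as a flatMap over the distinct values
lemma pvA_char (xs : List Int) :
    filter_zeros_and_ones xs = (PySem.Set.ofList xs).flatMap (pvGroup xs) := by
  unfold filter_zeros_and_ones
  rw [PySem.Dict.items_counter]
  rw [show (fun (out_list : List Int) (mn : Int × Int) =>
        if mn.1 > 1 then out_list ++ List.replicate mn.2.toNat mn.1
        else if mn.1 = 1 then out_list ++ List.replicate (min 2 mn.2).toNat mn.1
        else out_list ++ [0])
      = (fun out_list mn => out_list ++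
          (if mn.1 > 1 then List.replicate mn.2.toNat mn.1
           else if mn.1 = 1 then List.replicate (min 2 mn.2).toNat mn.1
           else [0])) from by funext o mn; split_ifs <;> rfl]
  rw [PySem.List.foldl_append_eq_flatMap]
  rw [List.flatMap_map]
  simp only [List.nil_append]
  apply pvFlatMap_congr
  intro x _
  simp only [pvGroup, Int.toNat_natCast]

-- B's output characterised the same way
lemma pvB_char (xs : List Int) :
    filter_zeros_and_ones_alt xs = (PySem.Set.ofList xs).flatMap (pvGroup xs) := by
  simp only [filter_zeros_and_ones_alt]
  have hs : (PySem.List.sorted xs (fun y => y) false).Pairwise (· ≤ ·) :=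
    PySem.List.sorted_pairwise xs (fun y => y)
  set srt := PySem.List.sorted xs (fun y => y) false with hsrt
  rw [show (fun (out_list : List Int) (v : Int) =>
        if v > 1 then out_list ++ List.replicate (pvRightIndex srt v - pvLeftIndex srt v).toNat v
        else if v = 1 then out_list ++ List.replicate (min 2 (pvRightIndex srt v - pvLeftIndex srt v)).toNat v
        else out_list ++ [0])
      = (fun out_list v => out_list ++
          (if v > 1 then List.replicate (pvRightIndex srt v - pvLeftIndex srt v).toNat v
           else if v = 1 then List.replicate (min 2 (pvRightIndex srt v - pvLeftIndex srt v)).toNat v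
           else [0])) from by funext o v; split_ifs <;> rfl]
  rw [PySem.List.foldl_append_eq_flatMap]
  rw [PySem.List.dedup_eq_ofList]
  simp only [List.nil_append]
  apply pvFlatMap_congr
  intro v _
  have hcnt : pvRightIndex srt v - pvLeftIndex srt v = (xs.count v : Int) := by
    rw [pvCount_eq srt v hs]
    congr 1
    exact (PySem.List.sorted_perm xs (fun y => y) false).count_eq v
  rw [hcnt]
  simp only [pvGroup, Int.toNat_natCast]

theorem filter_zeros_and_ones_spec : Claim_equal_filter_zeros_and_ones := by
  intro in_list _
  unfold Spec_filter_zeros_and_ones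
  rw [pvA_char, pvB_char]

-- ===== VERDICT (by name: the statement is the Claim_ definition above) =====
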